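-- pv_equiv track=rewrite | github.com/JYins/job_hunter | scripts/fetch_uwo_connect.py | _is_summary_row
-- ===== SOURCE A (Python) =====
-- def _is_summary_row(lower_row: str) -> bool:
--     tokens = [
--         "featured postings",
--         "new posting since last login",
--         "postings added in the last",
--         "application deadlines today",
--         "application deadlines in the next",
--         "job no longer available",
--         "app status | tags | job title",
--         "new graduate opportunities",
--         "dashboard",
--         "interviews",
--         "documents",
--         "appointments",
--     ]
--     return any(token in lower_row for token in tokens)
-- ===== SOURCE B (Python) =====
-- def _is_summary_row(lower_row: str) -> bool:
--     # One left-to-right scan over positions: at each position check whether any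
--     # keyword starts there, instead of one full substring scan per keyword.
--     tokens = [
--         "featured postings",
--         "new posting since last login",
--         "postings added in the last",
--         "application deadlines today",
--         "application deadlines in the next",
--         "job no longer available",
--         "app status | tags | job title",
--         "new graduate opportunities",
--         "dashboard",
--         "interviews",
--         "documents",
--         "appointments",
--     ]
--     for i in range(len(lower_row) + 1):
--         for token in tokens:
--             if lower_row.startswith(token, i):
--                 return True
--     return False
-- ===== Notes on version B (the rewrite author's own statement) =====
-- stated objective: alternative
-- what changed: B does a single left-to-right scan over string positions, testing at each position whether any keyword starts there, instead of A's twelve independent full substring scans.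
import Mathlib
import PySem

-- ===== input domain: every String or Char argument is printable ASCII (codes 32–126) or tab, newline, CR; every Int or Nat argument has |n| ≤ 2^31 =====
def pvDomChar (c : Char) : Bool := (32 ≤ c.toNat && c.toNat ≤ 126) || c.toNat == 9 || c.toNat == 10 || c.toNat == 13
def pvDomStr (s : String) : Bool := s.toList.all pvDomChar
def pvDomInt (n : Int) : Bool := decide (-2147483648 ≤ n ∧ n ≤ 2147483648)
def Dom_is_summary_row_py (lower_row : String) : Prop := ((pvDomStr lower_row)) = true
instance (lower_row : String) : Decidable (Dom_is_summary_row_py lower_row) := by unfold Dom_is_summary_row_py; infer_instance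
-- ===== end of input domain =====

-- B replaces A's twelve independent substring scans by a single left-to-right scan over
-- positions that tests at each position whether any keyword starts there (alternative, same cost class).

-- ===== PORT A =====
def pvTokensA : List String := [
  "featured postings",
  "new posting since last login",
  "postings added in the last",
  "application deadlines today",
  "application deadlines in the next",
  "job no longer available",
  "app status | tags | job title",
  "new graduate opportunities",
  "dashboard",
  "interviews",
  "documents",
  "appointments"]

-- any(token in lower_row for token in tokens)
def is_summary_row_py (lower_row : String) : Bool :=
  pvTokensA.any (fun token => PySem.Str.isIn token lower_row)

-- ===== PORT B =====
def pvTokensB : List String := [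
  "featured postings",
  "new posting since last login",
  "postings added in the last",
  "application deadlines today",
  "application deadlines in the next",
  "job no longer available",
  "app status | tags | job title",
  "new graduate opportunities",
  "dashboard",
  "interviews",
  "documents",
  "appointments"]

-- the loop 'for i in range(len(lower_row)+1): for token in tokens: if lower_row.startswith(token, i): return True'
-- as structural recursion on the suffix of the string starting at position i
-- (lower_row.startswith(token, i) is 'token is a prefix of the suffix at i' = PySem.Chars.startswith)
def pvScanB : List Char → Bool
  | [] => pvTokensB.any (fun token => PySem.Chars.startswith [] token.toList)
  | c :: rest =>
      pvTokensB.any (fun token => PySem.Chars.startswith (c :: rest) token.toList) || pvScanB rest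

def is_summary_row_py_alt (lower_row : String) : Bool :=
  pvScanB lower_row.toList

-- ===== PRECONDITION & SPEC =====
def Spec_is_summary_row_py (lower_row : String) (out : Bool) : Prop := out = is_summary_row_py_alt lower_row
instance (lower_row : String) (out : Bool) : Decidable (Spec_is_summary_row_py lower_row out) := by unfold Spec_is_summary_row_py; infer_instance

-- ===== CLAIM (what is proved, stated in full; the proofs are below) =====
def Claim_equal_is_summary_row_py : Prop := ∀ (lower_row : String), Dom_is_summary_row_py lower_row → Spec_is_summary_row_py lower_row (is_summary_row_py lower_row)

-- ===== LEMMAS AND PROOFS =====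

lemma pv_isIn_cons (t : List Char) (c : Char) (cs : List Char) :
    PySem.Chars.isIn t (c :: cs)
      = (PySem.Chars.startswith (c :: cs) t || PySem.Chars.isIn t cs) := by
  rw [Bool.eq_iff_iff]
  simp only [Bool.or_eq_true, PySem.Chars.isIn_iff_infix, PySem.Chars.startswith_iff]
  exact List.infix_cons_iff

lemma pvScanB_eq (s : List Char) :
    pvScanB s = pvTokensB.any (fun token => PySem.Chars.isIn token.toList s) := by
  induction s with
  | nil => decide
  | cons c cs ih =>
      rw [pvScanB, ih, Bool.eq_iff_iff]
      simp only [Bool.or_eq_true, List.any_eq_true, pv_isIn_cons]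
      constructor
      · rintro (⟨t, ht, h⟩ | ⟨t, ht, h⟩)
        · exact ⟨t, ht, by simp [h]⟩
        · exact ⟨t, ht, by simp [h]⟩
      · rintro ⟨t, ht, h⟩
        rcases h with h' | h'
        · exact Or.inl ⟨t, ht, h'⟩
        · exact Or.inr ⟨t, ht, h'⟩

-- ===== VERDICT (by name: the statement is the Claim_ definition above) =====
theorem is_summary_row_py_spec : Claim_equal_is_summary_row_py := by
  intro lower_row _
  unfold Spec_is_summary_row_py is_summary_row_py is_summary_row_py_alt
  rw [pvScanB_eq]
  simp only [PySem.Str.isIn_eq]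
  rfl
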